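-- pv_equiv track=rewrite | github.com/apache/beam | sdks/python/apache_beam/runners/portability/fn_api_runner/translations.py | _make_pack_name
-- ===== SOURCE A (Python) =====
-- def _make_pack_name(names):
--   """Return the packed Transform or Stage name.
--
--   The output name will contain the input names' common prefix, the infix
--   '/Packed', and the input names' suffixes in square brackets.
--   For example, if the input names are 'a/b/c1/d1' and 'a/b/c2/d2, then
--   the output name is 'a/b/Packed[c1_d1, c2_d2]'.
--   """
--   assert names
--   tokens_in_names = [name.split('/') for name in names]
--   common_prefix_tokens = []
--
--   # Find the longest common prefix of tokens.
--   while True: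
--     first_token_in_names = set()
--     for tokens in tokens_in_names:
--       if not tokens:
--         break
--       first_token_in_names.add(tokens[0])
--     if len(first_token_in_names) != 1:
--       break
--     common_prefix_tokens.append(next(iter(first_token_in_names)))
--     for tokens in tokens_in_names:
--       tokens.pop(0)
--
--   common_prefix_tokens.append('Packed')
--   common_prefix = '/'.join(common_prefix_tokens)
--   suffixes = ['_'.join(tokens) for tokens in tokens_in_names]
--   return '%s[%s]' % (common_prefix, ', '.join(suffixes))
-- ===== SOURCE B (Python) =====
-- def _make_pack_name(names):
--   """Return the packed Transform or Stage name (common prefix + '/Packed' + suffixes)."""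
--   assert names
--   tokens_in_names = [name.split('/') for name in names]
--   k = 0
--   for column in zip(*tokens_in_names):
--     if len(set(column)) != 1:
--       break
--     k += 1
--   common_prefix = '/'.join(tokens_in_names[0][:k] + ['Packed'])
--   suffixes = ['_'.join(tokens[k:]) for tokens in tokens_in_names]
--   return '%s[%s]' % (common_prefix, ', '.join(suffixes))
-- ===== Notes on version B (the rewrite author's own statement) =====
-- stated objective: simpler
-- what changed: Replaces A's destructive while-loop that repeatedly builds a set of first tokens and pops each token list in place by a single common-prefix count over zip(*tokens) columns followed by list slicing, with no mutation.
import Mathlib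
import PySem

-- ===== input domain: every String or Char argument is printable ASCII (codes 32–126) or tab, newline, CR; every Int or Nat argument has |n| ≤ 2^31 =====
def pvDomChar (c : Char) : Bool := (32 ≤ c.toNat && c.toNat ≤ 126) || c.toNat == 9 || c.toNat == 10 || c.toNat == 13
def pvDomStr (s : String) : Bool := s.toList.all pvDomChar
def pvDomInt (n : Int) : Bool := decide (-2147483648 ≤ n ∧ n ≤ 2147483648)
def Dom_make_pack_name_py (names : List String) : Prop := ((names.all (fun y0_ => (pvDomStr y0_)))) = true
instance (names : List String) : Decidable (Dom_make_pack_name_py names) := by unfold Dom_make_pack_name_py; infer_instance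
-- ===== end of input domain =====

-- B replaces A's destructive pop-loop over the token lists by a non-mutating common-prefix
-- count over zip columns plus slicing (objective: simpler). Return-value equivalence only:
-- A mutates its local token lists, never its argument.

-- name.split('/')
def pvSplit (s : String) : List String := (PySem.Str.split? s "/").getD []

-- ===== PORT A =====
-- the inner 'for tokens in tokens_in_names: if not tokens: break; first_token_in_names.add(tokens[0])'
def pvCollectFirsts : List (List String) → PySem.Set String → PySem.Set String
  | [], s => s
  | [] :: _, s => s
  | (x :: _) :: rest, s => pvCollectFirsts rest (PySem.Set.add s x)

-- the 'while True' loop; fuel makes it total (A's loop terminates; pop(0) on an empty list —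
-- Python's IndexError — is excluded by Pre_ and ported as a no-op drop)
def pvALoop : Nat → List (List String) → List String → List String × List (List String)
  | 0, tss, acc => (acc, tss)
  | n + 1, tss, acc =>
    let s := pvCollectFirsts tss PySem.Set.empty
    if s.length ≠ 1 then (acc, tss)
    else pvALoop n (tss.map (List.drop 1)) (acc ++ [s.headD ""])

def make_pack_name_py (names : List String) : String :=
  let tss := names.map pvSplit
  let r := pvALoop ((tss.map List.length).sum + 1) tss []
  let common := PySem.Str.join "/" (r.1 ++ ["Packed"])
  let suffixes := r.2.map (fun t => PySem.Str.join "_" t)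
  common ++ "[" ++ PySem.Str.join ", " suffixes ++ "]"

-- ===== PORT B =====
-- len(set(column)) == 1
def pvUniform (c : List String) : Bool := (PySem.Set.ofList c).length == 1

-- zip(*tokens_in_names): columns while every list still has an element (fuel makes it total)
def pvZipStarF : Nat → List (List String) → List (List String)
  | 0, _ => []
  | n + 1, tss =>
    if tss = [] ∨ tss.any List.isEmpty then []
    else (tss.map (fun t => t.headD "")) :: pvZipStarF n (tss.map (List.drop 1))

def pvZipStar (tss : List (List String)) : List (List String) :=
  pvZipStarF ((tss.map List.length).sum + 1) tss

def make_pack_name_py_alt (names : List String) : String :=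
  let tss := names.map pvSplit
  let k := ((pvZipStar tss).takeWhile pvUniform).length
  let common := PySem.Str.join "/" ((tss.headD []).take k ++ ["Packed"])
  let suffixes := tss.map (fun t => PySem.Str.join "_" (t.drop k))
  common ++ "[" ++ PySem.Str.join ", " suffixes ++ "]"

-- ===== PRECONDITION & SPEC =====
-- The state A's loop would have to reach to raise, read off the input's token lists:
-- with t the minimum token count, all lists agree on their first t tokens, the first list is
-- longer than t, and every list before the first minimal-length one agrees at position t.
def pvRC (tss : List (List String)) : Prop :=
  (∀ T ∈ tss, T.take (((tss.map List.length).min?).getD 0) =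
      (tss.headD []).take (((tss.map List.length).min?).getD 0)) ∧
  (((tss.map List.length).min?).getD 0) < (tss.headD []).length ∧
  (∀ T ∈ tss.takeWhile (fun T => decide ((((tss.map List.length).min?).getD 0) < T.length)),
      T.getD (((tss.map List.length).min?).getD 0) "" =
      (tss.headD []).getD (((tss.map List.length).min?).getD 0) "")

-- Pre_ excludes the empty list (A's 'assert names' raises AssertionError) and the inputs where
-- A's pop(0) hits an already-exhausted token list (IndexError); A returns on everything else.
def Pre_make_pack_name_py (names : List String) : Prop :=
  names ≠ [] ∧ ¬ pvRC (names.map pvSplit)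
instance (names : List String) : Decidable (Pre_make_pack_name_py names) := by
  unfold Pre_make_pack_name_py pvRC; infer_instance

def pvWitness_make_pack_name_py : List String := ["a/b/c1/d1", "a/b/c2/d2"]

def Spec_make_pack_name_py (names : List String) (out : String) : Prop := out = make_pack_name_py_alt names
instance (names : List String) (out : String) : Decidable (Spec_make_pack_name_py names out) := by unfold Spec_make_pack_name_py; infer_instance

-- ===== CLAIM (what is proved, stated in full; the proofs are below) =====
def Claim_equal_make_pack_name_py : Prop := ∀ (names : List String), Dom_make_pack_name_py names → Pre_make_pack_name_py names → Spec_make_pack_name_py names (make_pack_name_py names)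

-- ===== LEMMAS AND PROOFS =====

theorem pvSumDrop_le (tss : List (List String)) :
    ((tss.map (List.drop 1)).map List.length).sum ≤ (tss.map List.length).sum := by
  induction tss with
  | nil => simp
  | cons T rest ih =>
    simp only [List.map_cons, List.sum_cons]
    have : (T.drop 1).length ≤ T.length := by simp
    omega

theorem pvSumDrop_lt (tss : List (List String)) (h1 : tss ≠ []) (h2 : ∀ T ∈ tss, T ≠ []) :
    ((tss.map (List.drop 1)).map List.length).sum < (tss.map List.length).sum := by
  cases tss with
  | nil => exact absurd rfl h1
  | cons T rest =>
    simp only [List.map_cons, List.sum_cons]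
    have hT : T ≠ [] := h2 T (by simp)
    have hTl : 0 < T.length := List.length_pos_iff.mpr hT
    have h3 : (T.drop 1).length = T.length - 1 := by simp
    have := pvSumDrop_le rest
    omega

theorem pvFoldlAdd_const (l : List String) (a : String) (h : ∀ x ∈ l, x = a) :
    l.foldl PySem.Set.add [a] = [a] := by
  induction l with
  | nil => rfl
  | cons x xs ih =>
    have hx : x = a := h x (by simp)
    subst hx
    have : PySem.Set.add [x] x = [x] := by simp [PySem.Set.add, PySem.Set.contains]
    simp only [List.foldl_cons, this]
    exact ih (fun y hy => h y (by simp [hy]))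

theorem pvOfList_const (l : List String) (hl : l ≠ []) (h : ∀ x ∈ l, x = l.headD "") :
    PySem.Set.ofList l = [l.headD ""] := by
  cases l with
  | nil => exact absurd rfl hl
  | cons a t =>
    rw [PySem.Set.ofList_eq_foldl]
    simp only [List.foldl_cons, List.headD_cons]
    have ha : PySem.Set.add [] a = [a] := by rfl
    rw [ha]
    exact pvFoldlAdd_const t a (fun x hx => by simpa using h x (by simp [hx]))

theorem pvOfList_len_one_iff (l : List String) (hl : l ≠ []) :
    (PySem.Set.ofList l).length = 1 ↔ ∀ x ∈ l, x = l.headD "" := by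
  constructor
  · intro h1
    have hmem : ∀ x, x ∈ PySem.Set.ofList l ↔ x ∈ l := fun x => PySem.Set.mem_ofList l x
    obtain ⟨y, hy⟩ : ∃ y, PySem.Set.ofList l = [y] := by
      cases hs : PySem.Set.ofList l with
      | nil => simp [hs] at h1
      | cons y ys => cases ys with
        | nil => exact ⟨y, rfl⟩
        | cons z zs => simp [hs] at h1
    intro x hx
    have hxy : x = y := by have := (hmem x).mpr hx; simp [hy] at this; exact this
    have hh : l.headD "" ∈ l := by cases l with | nil => simp at hl | cons a t => simp
    have hhy : l.headD "" = y := by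
      have := (hmem _).mpr hh; simp [hy] at this
      rw [List.headD_eq_head?_getD]; exact this
    rw [hxy, hhy]
  · intro h
    simp [pvOfList_const l hl h]

-- the inner for-loop when no list is exhausted: the set of all heads
theorem pvCf_nonempty (tss : List (List String)) (s : PySem.Set String)
    (h : ∀ T ∈ tss, T ≠ []) :
    pvCollectFirsts tss s = (tss.map (fun t => t.headD "")).foldl PySem.Set.add s := by
  induction tss generalizing s with
  | nil => rfl
  | cons T rest ih =>
    cases T with
    | nil => exact absurd rfl (h [] (by simp))
    | cons x xs =>
      simp only [pvCollectFirsts, List.map_cons, List.foldl_cons, List.headD_cons]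
      exact ih _ (fun U hU => h U (by simp [hU]))

-- the inner for-loop when it breaks at the first exhausted list
theorem pvCf_break (pre rest : List (List String)) (s : PySem.Set String)
    (h : ∀ T ∈ pre, T ≠ []) :
    pvCollectFirsts (pre ++ [] :: rest) s = (pre.map (fun t => t.headD "")).foldl PySem.Set.add s := by
  induction pre generalizing s with
  | nil => rfl
  | cons T p ih =>
    cases T with
    | nil => exact absurd rfl (h [] (by simp))
    | cons x xs =>
      simp only [List.cons_append, pvCollectFirsts, List.map_cons, List.foldl_cons, List.headD_cons]
      exact ih _ (fun U hU => h U (by simp [hU]))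

theorem pvAllNonempty_of_any_false (tss : List (List String))
    (h : ¬ tss.any List.isEmpty = true) : ∀ T ∈ tss, T ≠ [] := by
  intro T hT hTnil
  apply h
  rw [List.any_eq_true]
  exact ⟨T, hT, by simp [hTnil]⟩

theorem pvZipStarF_irrel (m : Nat) : ∀ (n : Nat) (tss : List (List String)),
    (tss.map List.length).sum < m → (tss.map List.length).sum < n →
    pvZipStarF m tss = pvZipStarF n tss := by
  induction m with
  | zero => intro n tss hm; omega
  | succ m ih =>
    intro n tss hm hn
    cases n with
    | zero => omega
    | succ n =>
      simp only [pvZipStarF]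
      split
      · rfl
      · rename_i hcond
        rw [not_or] at hcond
        have hlt := pvSumDrop_lt tss hcond.1 (pvAllNonempty_of_any_false tss hcond.2)
        exact congrArg _ (ih n (tss.map (List.drop 1)) (by omega) (by omega))

theorem pvZipStar_eq (tss : List (List String)) :
    pvZipStar tss = if tss = [] ∨ tss.any List.isEmpty then []
      else (tss.map (fun t => t.headD "")) :: pvZipStar (tss.map (List.drop 1)) := by
  unfold pvZipStar
  simp only [pvZipStarF]
  split
  · rfl
  · rename_i hcond
    rw [not_or] at hcond
    have hlt := pvSumDrop_lt tss hcond.1 (pvAllNonempty_of_any_false tss hcond.2)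
    exact congrArg _ (pvZipStarF_irrel ((tss.map List.length).sum)
      (((tss.map (List.drop 1)).map List.length).sum + 1) (tss.map (List.drop 1)) (by omega) (by omega))

theorem pvGetD_zero_headD (l : List String) : l.getD 0 "" = l.headD "" := by
  cases l <;> rfl


theorem pvMin_le (tss : List (List String)) (T : List String) (hT : T ∈ tss) :
    ((tss.map List.length).min?).getD 0 ≤ T.length := by
  cases h : (tss.map List.length).min? with
  | none =>
    rw [List.min?_eq_none_iff] at h
    simp only [List.map_eq_nil_iff] at h
    subst h; simp at hT
  | some m =>
    have := (List.min?_eq_some_iff.mp h).2 T.length (List.mem_map_of_mem hT)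
    simpa using this

theorem pvMin_mem (tss : List (List String)) (h : tss ≠ []) :
    ∃ T ∈ tss, T.length = ((tss.map List.length).min?).getD 0 := by
  cases hm : (tss.map List.length).min? with
  | none =>
    rw [List.min?_eq_none_iff] at hm
    simp only [List.map_eq_nil_iff] at hm
    exact absurd hm h
  | some m =>
    have hmem := (List.min?_eq_some_iff.mp hm).1
    obtain ⟨T, hT, hTl⟩ := List.mem_map.mp hmem
    exact ⟨T, hT, by simp [hTl]⟩

theorem pvMin_shift (tss : List (List String)) (hne : tss ≠ []) (hall : ∀ T ∈ tss, T ≠ []) :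
    (((tss.map (List.drop 1)).map List.length).min?).getD 0 + 1
      = ((tss.map List.length).min?).getD 0 := by
  obtain ⟨T, hT, hTl⟩ := pvMin_mem tss hne
  have hT1 : 1 ≤ T.length := List.length_pos_iff.mpr (hall T hT)
  have h1 : (((tss.map (List.drop 1)).map List.length).min?).getD 0 ≤ T.length - 1 := by
    have := pvMin_le (tss.map (List.drop 1)) (T.drop 1) (List.mem_map_of_mem hT)
    simpa using this
  obtain ⟨T', hT', hT'l⟩ := pvMin_mem (tss.map (List.drop 1)) (by simpa using hne)
  obtain ⟨U, hU, hUd⟩ := List.mem_map.mp hT'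
  have hUmin := pvMin_le tss U hU
  have hU1 : 1 ≤ U.length := List.length_pos_iff.mpr (hall U hU)
  have hlen : T'.length = U.length - 1 := by rw [← hUd]; simp
  omega

theorem pvTw_mem (t' : Nat) (tss : List (List String)) (hall : ∀ T ∈ tss, T ≠ [])
    (T : List String) (hT : T ∈ tss.takeWhile (fun U => decide (t' + 1 < U.length))) :
    T.drop 1 ∈ (tss.map (List.drop 1)).takeWhile (fun U => decide (t' < U.length)) := by
  induction tss with
  | nil => simp at hT
  | cons U rest ih =>
    have hU1 : 1 ≤ U.length := List.length_pos_iff.mpr (hall U (by simp))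
    simp only [List.takeWhile_cons, List.map_cons] at hT ⊢
    by_cases hp : t' + 1 < U.length
    · have hp' : t' < (U.drop 1).length := by simp; omega
      simp only [hp, decide_true, if_true] at hT
      simp only [hp', decide_true, if_true]
      rcases List.mem_cons.mp hT with hTe | hTm
      · subst hTe; simp
      · exact List.mem_cons_of_mem _ (ih (fun V hV => hall V (by simp [hV])) hTm)
    · simp [hp] at hT

theorem pvHeadD_map_drop (tss : List (List String)) (hne : tss ≠ []) :
    (tss.map (List.drop 1)).headD [] = (tss.headD []).drop 1 := by
  cases tss with
  | nil => exact absurd rfl hne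
  | cons T rest => rfl

theorem pvHeadD_map_head (tss : List (List String)) (hne : tss ≠ []) :
    (tss.map (fun t => t.headD "")).headD "" = (tss.headD []).headD "" := by
  cases tss with
  | nil => exact absurd rfl hne
  | cons T rest => rfl

theorem pvTake_succ (l : List String) (h : l ≠ []) (n : Nat) :
    l.take (n + 1) = l.headD "" :: (l.drop 1).take n := by
  cases l with
  | nil => exact absurd rfl h
  | cons a t => simp

theorem pvGetD_succ_drop (l : List String) (h : l ≠ []) (n : Nat) :
    l.getD (n + 1) "" = (l.drop 1).getD n "" := by
  cases l with
  | nil => exact absurd rfl h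
  | cons a t => simp

theorem pvHead_mem (tss : List (List String)) (hne : tss ≠ []) : tss.headD [] ∈ tss := by
  cases tss with
  | nil => exact absurd rfl hne
  | cons a t => simp

-- A's raise condition is inherited backwards through one uniform popping step
theorem pvRC_shift (tss : List (List String)) (hne : tss ≠ []) (hall : ∀ T ∈ tss, T ≠ [])
    (hunif : ∀ T ∈ tss, T.headD "" = (tss.headD []).headD "")
    (h : pvRC (tss.map (List.drop 1))) : pvRC tss := by
  obtain ⟨h1, h2, h3⟩ := h
  have hT0 : tss.headD [] ≠ [] := hall _ (pvHead_mem tss hne)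
  have hhd : (tss.map (List.drop 1)).headD [] = (tss.headD []).drop 1 := pvHeadD_map_drop tss hne
  unfold pvRC
  rw [← pvMin_shift tss hne hall]
  refine ⟨?_, ?_, ?_⟩
  · intro T hT
    have hTne : T ≠ [] := hall T hT
    rw [pvTake_succ T hTne, pvTake_succ _ hT0]
    have e1 : T.headD "" = (tss.headD []).headD "" := hunif T hT
    have e2 : (T.drop 1).take _ = ((tss.map (List.drop 1)).headD []).take _ :=
      h1 (T.drop 1) (List.mem_map_of_mem hT)
    rw [e1, e2, hhd]
  · have : ((tss.headD []).drop 1).length = (tss.headD []).length - 1 := by simp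
    have h0 : 1 ≤ (tss.headD []).length := List.length_pos_iff.mpr hT0
    rw [hhd] at h2
    omega
  · intro T hT
    have hTmem : T ∈ tss := (List.takeWhile_prefix _).subset hT
    have hTne : T ≠ [] := hall T hTmem
    rw [pvGetD_succ_drop T hTne, pvGetD_succ_drop _ hT0]
    have := h3 (T.drop 1) (pvTw_mem _ tss hall T hT)
    rw [this, hhd]

theorem pvHeadD_append (pre l : List (List String)) (h : pre ≠ []) :
    (pre ++ l).headD [] = pre.headD [] := by
  cases pre with
  | nil => exact absurd rfl h
  | cons a t => rfl

theorem pvMain (n : Nat) : ∀ (tss : List (List String)) (acc : List String),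
    (tss.map List.length).sum < n → tss ≠ [] → ¬ pvRC tss →
    pvALoop n tss acc =
      (acc ++ (tss.headD []).take (((pvZipStar tss).takeWhile pvUniform).length),
       tss.map (List.drop (((pvZipStar tss).takeWhile pvUniform).length))) := by
  induction n with
  | zero => intro tss acc h; omega
  | succ n ih =>
    intro tss acc hsum hne hrc
    simp only [pvALoop]
    by_cases hall : ∀ T ∈ tss, T ≠ []
    · have hheads_ne : tss.map (fun t => t.headD "") ≠ [] := by simpa using hne
      have hcf : pvCollectFirsts tss PySem.Set.empty
          = PySem.Set.ofList (tss.map (fun t => t.headD "")) := by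
        rw [pvCf_nonempty tss PySem.Set.empty hall, PySem.Set.ofList_eq_foldl]
        rfl
      have hany : tss.any List.isEmpty = false := by
        rw [List.any_eq_false]
        intro T hT
        simpa [List.isEmpty_iff] using hall T hT
      have hzip : pvZipStar tss
          = (tss.map (fun t => t.headD "")) :: pvZipStar (tss.map (List.drop 1)) := by
        rw [pvZipStar_eq]
        simp [hne, hany]
      by_cases hunif : ∀ T ∈ tss, T.headD "" = (tss.headD []).headD ""
      · -- all first tokens equal: A pops, B counts one more zip column
        have hunif' : ∀ x ∈ tss.map (fun t => t.headD ""),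
            x = (tss.map (fun t => t.headD "")).headD "" := by
          intro x hx
          obtain ⟨T, hT, rfl⟩ := List.mem_map.mp hx
          rw [pvHeadD_map_head tss hne]
          exact hunif T hT
        have hof := pvOfList_const _ hheads_ne hunif'
        have hT0 : tss.headD [] ≠ [] := hall _ (pvHead_mem tss hne)
        have hu : pvUniform (tss.map (fun t => t.headD "")) = true := by
          unfold pvUniform
          rw [hof]
          rfl
        rw [hcf, hof, if_neg (by simp)]
        have hne' : tss.map (List.drop 1) ≠ [] := by simpa using hne
        have hsum' := pvSumDrop_lt tss hne hall
        have hrc' : ¬ pvRC (tss.map (List.drop 1)) :=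
          fun h => hrc (pvRC_shift tss hne hall hunif h)
        rw [ih (tss.map (List.drop 1)) _ (by omega) hne' hrc']
        rw [hzip]
        simp only [List.takeWhile_cons, hu, if_true, List.length_cons]
        rw [Prod.mk.injEq]
        refine ⟨?_, ?_⟩
        · rw [pvTake_succ _ hT0, pvHeadD_map_drop tss hne, pvHeadD_map_head tss hne]
          simp
        · rw [List.map_map]
          apply List.map_congr_left
          intro T hT
          simp only [Function.comp_apply, List.drop_drop]
          rw [Nat.add_comm]
      · -- first tokens differ: both loops stop here
        have hlen : (PySem.Set.ofList (tss.map (fun t => t.headD ""))).length ≠ 1 := by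
          intro h1
          apply hunif
          intro T hT
          have := (pvOfList_len_one_iff _ hheads_ne).mp h1 (T.headD "") (List.mem_map_of_mem hT)
          rw [this, pvHeadD_map_head tss hne]
        have hu : pvUniform (tss.map (fun t => t.headD "")) = false := by
          unfold pvUniform
          rw [beq_eq_false_iff_ne]
          exact hlen
        rw [hcf, if_pos hlen, hzip]
        simp only [List.takeWhile_cons, hu, Bool.false_eq_true, if_false, List.length_nil,
          List.take_zero, List.append_nil]
        have hmapid : List.map (List.drop 0) tss = tss := by
          calc List.map (List.drop 0) tss = List.map id tss :=
                List.map_congr_left (fun T _ => List.drop_zero)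
            _ = tss := List.map_id tss
        rw [hmapid]
    · -- some token list already exhausted: A's set misses it, B's zip has no column
      have hzip : pvZipStar tss = [] := by
        rw [pvZipStar_eq, if_pos]
        right
        rw [List.any_eq_true]
        push_neg at hall
        obtain ⟨T, hT, hTnil⟩ := hall
        exact ⟨T, hT, by simp [hTnil]⟩
      rw [hzip]
      simp only [List.takeWhile_nil, List.length_nil, List.take_zero, List.append_nil]
      have hmapid : List.map (List.drop 0) tss = tss := by
        calc List.map (List.drop 0) tss = List.map id tss :=
              List.map_congr_left (fun T _ => List.drop_zero)
          _ = tss := List.map_id tss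
      -- decompose tss at the first exhausted list
      have hsplit : tss.takeWhile (fun T => !T.isEmpty) ++ tss.dropWhile (fun T => !T.isEmpty) = tss :=
        List.takeWhile_append_dropWhile
      have hpost_ne : tss.dropWhile (fun T => !T.isEmpty) ≠ [] := by
        intro h0
        apply hall
        intro T hT
        have := List.dropWhile_eq_nil_iff.mp h0 T hT
        simpa [List.isEmpty_iff] using this
      obtain ⟨post0, postR, hpost⟩ : ∃ a l, tss.dropWhile (fun T => !T.isEmpty) = a :: l := by
        cases hp : tss.dropWhile (fun T => !T.isEmpty) with
        | nil => exact absurd hp hpost_ne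
        | cons a l => exact ⟨a, l, rfl⟩
      have hpost0 : post0 = [] := by
        have := List.head_dropWhile_not (fun T : List String => !T.isEmpty) hpost_ne
        simp only [hpost, List.head_cons] at this
        simpa [List.isEmpty_iff] using this
      have htss : tss = tss.takeWhile (fun T => !T.isEmpty) ++ [] :: postR := by
        conv_lhs => rw [← hsplit]
        rw [hpost, hpost0]
      have hpre_ne : ∀ T ∈ tss.takeWhile (fun T => !T.isEmpty), T ≠ [] := by
        intro T hT
        have := List.mem_takeWhile_imp hT
        simpa [List.isEmpty_iff] using this
      have hcf : pvCollectFirsts tss PySem.Set.empty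
          = PySem.Set.ofList ((tss.takeWhile (fun T => !T.isEmpty)).map (fun t => t.headD "")) := by
        conv_lhs => rw [htss]
        rw [pvCf_break _ _ _ hpre_ne, PySem.Set.ofList_eq_foldl]
        rfl
      have hmin0 : ((tss.map List.length).min?).getD 0 = 0 := by
        have : ([] : List String) ∈ tss := by rw [htss]; simp
        have := pvMin_le tss [] this
        simpa using this
      rw [hmapid, hcf, if_pos]
      -- it remains to show the break really happens: a singleton set here is exactly pvRC
      intro h1
      apply hrc
      set pre := tss.takeWhile (fun T => !T.isEmpty) with hpre
      have hpre_ne' : pre ≠ [] := by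
        intro h0
        rw [h0] at h1
        simp [PySem.Set.ofList] at h1
      have hpremap_ne : pre.map (fun t => t.headD "") ≠ [] := by simpa using hpre_ne'
      have hconst := (pvOfList_len_one_iff _ hpremap_ne).mp h1
      have hT0pre : tss.headD [] = pre.headD [] := by
        conv_lhs => rw [htss]
        exact pvHeadD_append _ _ hpre_ne'
      unfold pvRC
      rw [hmin0]
      refine ⟨by simp, ?_, ?_⟩
      · rw [hT0pre]
        exact List.length_pos_iff.mpr (hpre_ne _ (pvHead_mem pre hpre_ne'))
      · have hpred : (fun T : List String => decide (0 < T.length)) = (fun T => !T.isEmpty) := by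
          funext T
          cases T <;> simp
        rw [hpred]
        intro T hT
        rw [pvGetD_zero_headD, pvGetD_zero_headD, hT0pre]
        have h1' := hconst (T.headD "") (List.mem_map_of_mem hT)
        have h2' := hconst ((pre.headD []).headD "") (List.mem_map_of_mem (pvHead_mem pre hpre_ne'))
        rw [h1', h2']

-- ===== VERDICT (by name: the statement is the Claim_ definition above) =====
theorem make_pack_name_py_spec : Claim_equal_make_pack_name_py := by
  intro names _ hpre
  obtain ⟨hne, hrc⟩ := hpre
  have htne : names.map pvSplit ≠ [] := by simpa using hne
  unfold Spec_make_pack_name_py make_pack_name_py make_pack_name_py_alt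
  dsimp only
  rw [pvMain _ _ _ (Nat.lt_succ_self _) htne hrc]
  simp only [List.nil_append, List.map_map]
  rfl
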